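-- pv_equiv track=rewrite | github.com/yifanyin11/partnr-planner | dataset_generation/benchmark_generation/evaluation_generation/parsing.py | trim_template_to_fit
-- ===== SOURCE A (Python) =====
-- class LLMGenerationError(Exception):
--     pass
--
-- def trim_template_to_fit(template_str: str, max_str_len: int = 2600) -> str:
--     """
--     If the template string is longer than max_str_len, remove the furniture-room
--     relations. Helps avoid OOM errors with LLM.
--     """
--     if len(template_str) <= max_str_len:
--         return template_str
--     # otherwise, remove furniture-room relations
--     remove = False
--     new_lines = []
--     for line in template_str.split("\n"):
--         if "Furniture-Room Relations:" in line:
--             remove = True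
--
--         if not remove:
--             new_lines.append(line)
--
--         if remove and line.strip() == "":
--             remove = False
--
--     template_str = "\n".join(new_lines)
--     if len(template_str) <= max_str_len:
--         return template_str
--
--     raise LLMGenerationError("template example contains too many tokens. OOM expected.")
-- ===== SOURCE B (Python) =====
-- class LLMGenerationError(Exception):
--     pass
--
-- def trim_template_to_fit(template_str: str, max_str_len: int = 2600) -> str:
--     """
--     If the template string is longer than max_str_len, remove the furniture-room
--     relations. Helps avoid OOM errors with LLM.
--     """
--     if len(template_str) <= max_str_len:
--         return template_str
--     # stage 1: partition the lines into blocks, each block ending at (and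
--     # including) a blank line; a trailing block may lack its blank line
--     blocks = []
--     cur = []
--     for line in template_str.split("\n"):
--         cur.append(line)
--         if line.strip() == "":
--             blocks.append(cur)
--             cur = []
--     if cur:
--         blocks.append(cur)
--
--     # stage 2: truncate every block at its first marker line
--     def clean(block):
--         for k, line in enumerate(block):
--             if "Furniture-Room Relations:" in line:
--                 return block[:k]
--         return block
--
--     # stage 3: flatten the cleaned blocks back into a string
--     result = "\n".join(line for b in blocks for line in clean(b))
--     if len(result) <= max_str_len:
--         return result
--     raise LLMGenerationError("template example contains too many tokens. OOM expected.")
-- ===== Notes on version B (the rewrite author's own statement) =====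
-- stated objective: alternative
-- what changed: Replaces A's stateful single pass with a threaded boolean removal flag by a staged block decomposition: the lines are first partitioned into blank-line-terminated blocks, each block is then independently truncated at its first marker line, and the cleaned blocks are flattened back; the length guards and the raise are unchanged.
import Mathlib
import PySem

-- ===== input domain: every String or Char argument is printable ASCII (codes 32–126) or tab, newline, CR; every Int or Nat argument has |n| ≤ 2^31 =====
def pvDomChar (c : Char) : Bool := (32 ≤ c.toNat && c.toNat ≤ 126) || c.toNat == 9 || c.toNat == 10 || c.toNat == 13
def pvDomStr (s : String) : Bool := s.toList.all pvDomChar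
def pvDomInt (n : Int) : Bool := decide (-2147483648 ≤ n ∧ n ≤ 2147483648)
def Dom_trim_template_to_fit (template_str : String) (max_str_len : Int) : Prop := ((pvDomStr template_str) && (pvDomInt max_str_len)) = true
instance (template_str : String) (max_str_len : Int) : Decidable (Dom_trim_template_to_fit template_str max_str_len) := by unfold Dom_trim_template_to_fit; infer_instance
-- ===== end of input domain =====

-- B replaces A's stateful flag-threaded pass by a staged block decomposition: partition the
-- lines into blank-terminated blocks, truncate each block at its first marker line, flatten.

-- ===== PORT A =====
-- A's loop body (the fold step over A's state (remove, new_lines)), named for the proofs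
def pvStepA (st : Bool × List String) (line : String) : Bool × List String :=
  let remove := if PySem.Str.isIn "Furniture-Room Relations:" line then true else st.1
  let newLines := if remove then st.2 else st.2 ++ [line]
  let remove := if remove && (PySem.Str.strip line == "") then false else remove
  (remove, newLines)

def trim_template_to_fit (template_str : String) (max_str_len : Int) : String :=
  if PySem.Str.len template_str ≤ max_str_len then template_str
  else
    let st := ((PySem.Str.split? template_str "\n").getD []).foldl pvStepA (false, [])
    let t := PySem.Str.join "\n" st.2
    if PySem.Str.len t ≤ max_str_len then t
    else t  -- Python raises LLMGenerationError here; excluded by Pre_ (port's value irrelevant there)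

-- ===== PORT B =====
-- stage-1 loop body: append the line to the current block; a blank line closes the block
def pvBlocksStep (st : List (List String) × List String) (line : String) : List (List String) × List String :=
  let cur := st.2 ++ [line]
  if PySem.Str.strip line == "" then (st.1 ++ [cur], []) else (st.1, cur)

-- stage 2 (B's `clean`): the prefix of a block before its first marker line
def pvClean : List String → List String
  | [] => []
  | l :: rest =>
    if PySem.Str.isIn "Furniture-Room Relations:" l then []
    else l :: pvClean rest

def trim_template_to_fit_alt (template_str : String) (max_str_len : Int) : String :=
  if PySem.Str.len template_str ≤ max_str_len then template_str
  else
    let st := ((PySem.Str.split? template_str "\n").getD []).foldl pvBlocksStep ([], [])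
    let blocks := if st.2.isEmpty then st.1 else st.1 ++ [st.2]
    let result := PySem.Str.join "\n" (blocks.flatMap pvClean)
    if PySem.Str.len result ≤ max_str_len then result
    else result  -- Python raises LLMGenerationError here; excluded by Pre_

-- ===== PRECONDITION & SPEC =====
-- Declarative description of the line set A's trimming removes: line i is removed iff some
-- marker line j ≤ i is separated from i by no blank line (used only to state where A raises).
def pvRemovedAt (lines : List String) (i : Nat) : Bool :=
  (List.range (i+1)).any (fun j =>
    PySem.Str.isIn "Furniture-Room Relations:" (lines.getD j "") &&
    (List.range' j (i-j)).all (fun k => !(PySem.Str.strip (lines.getD k "") == "")))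

def pvTrimmed (s : String) : String :=
  let lines := (PySem.Str.split? s "\n").getD []
  PySem.Str.join "\n"
    (((List.range lines.length).filter (fun i => !pvRemovedAt lines i)).map (fun i => lines.getD i ""))

-- Pre_ excludes exactly the inputs on which Python A raises LLMGenerationError (the string is
-- over the limit even after removing the furniture-room relation blocks); B raises there too.
def Pre_trim_template_to_fit (template_str : String) (max_str_len : Int) : Prop :=
  PySem.Str.len template_str ≤ max_str_len ∨ PySem.Str.len (pvTrimmed template_str) ≤ max_str_len
instance (template_str : String) (max_str_len : Int) : Decidable (Pre_trim_template_to_fit template_str max_str_len) := by unfold Pre_trim_template_to_fit; infer_instance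

def pvWitness_trim_template_to_fit : String × Int := ("Furniture-Room Relations:\n - chair in kitchen\n\nrest", 10)

def Spec_trim_template_to_fit (template_str : String) (max_str_len : Int) (out : String) : Prop := out = trim_template_to_fit_alt template_str max_str_len
instance (template_str : String) (max_str_len : Int) (out : String) : Decidable (Spec_trim_template_to_fit template_str max_str_len out) := by unfold Spec_trim_template_to_fit; infer_instance

-- ===== CLAIM (what is proved, stated in full; the proofs are below) =====
def Claim_equal_trim_template_to_fit : Prop := ∀ (template_str : String) (max_str_len : Int), Dom_trim_template_to_fit template_str max_str_len → Pre_trim_template_to_fit template_str max_str_len → Spec_trim_template_to_fit template_str max_str_len (trim_template_to_fit template_str max_str_len)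

-- ===== LEMMAS AND PROOFS =====

-- a string stripping to "" consists of whitespace only
theorem strip_eq_nil_all_space (cs : List Char) (h : PySem.Chars.strip cs = [])
    {c : Char} (hc : c ∈ cs) : PySem.Chars.isspace c = true := by
  simp only [PySem.Chars.strip, PySem.Chars.rstrip, PySem.Chars.lstrip] at h
  rw [List.reverse_eq_nil_iff, List.dropWhile_eq_nil_iff] at h
  have hdrop : ∀ x ∈ List.dropWhile PySem.Chars.isspace cs, PySem.Chars.isspace x = true := by
    intro x hx
    exact h x (List.mem_reverse.mpr hx)
  rcases List.mem_append.mp ((List.takeWhile_append_dropWhile (p := PySem.Chars.isspace) (l := cs)) ▸ hc) with h1 | h2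
  · exact List.mem_takeWhile_imp h1
  · exact hdrop c h2

-- a line containing the marker never strips to the empty string ('F' is not whitespace)
theorem marker_not_blank (l : String)
    (h : PySem.Str.isIn "Furniture-Room Relations:" l = true) :
    (PySem.Str.strip l == "") = false := by
  have hinf : ("Furniture-Room Relations:").toList <:+: l.toList :=
    (PySem.Str.isIn_iff_infix _ _).mp h
  have hF : 'F' ∈ l.toList := hinf.subset (by decide)
  by_contra hne
  have hb : (PySem.Str.strip l == "") = true := by
    cases heq : (PySem.Str.strip l == "") with
    | false => exact absurd heq hne
    | true => rfl
  have hstr : PySem.Str.strip l = "" := by simpa using hb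
  have hnil : PySem.Chars.strip l.toList = [] := by
    have := congrArg String.toList hstr
    simpa [PySem.Str.strip] using this
  have := strip_eq_nil_all_space l.toList hnil hF
  simp [PySem.Chars.isspace] at this

def pvHasM (xs : List String) : Bool :=
  xs.any (fun l => PySem.Str.isIn "Furniture-Room Relations:" l)

theorem pvHasM_cons (l : String) (rest : List String) :
    pvHasM (l :: rest) = (PySem.Str.isIn "Furniture-Room Relations:" l || pvHasM rest) := by
  simp only [pvHasM, List.any_cons]

theorem pvClean_append (xs ys : List String) :
    pvClean (xs ++ ys) = if pvHasM xs then pvClean xs else xs ++ pvClean ys := by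
  induction xs with
  | nil => simp [pvHasM]
  | cons l rest ih =>
    rw [List.cons_append]
    simp only [pvClean]
    rw [pvHasM_cons]
    cases hm : PySem.Str.isIn "Furniture-Room Relations:" l with
    | true => simp
    | false =>
      rw [ih]
      cases h : pvHasM rest with
      | true => simp
      | false => simp

theorem pvClean_no_marker (xs : List String) (h : pvHasM xs = false) : pvClean xs = xs := by
  induction xs with
  | nil => rfl
  | cons l rest ih =>
    rw [pvHasM_cons, Bool.or_eq_false_iff] at h
    simp only [pvClean]
    rw [if_neg (by rw [h.1]; exact Bool.false_ne_true), ih h.2]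

theorem pvClean_snoc (cur : List String) (l : String) :
    pvClean (cur ++ [l]) =
      if pvHasM cur then pvClean cur
      else if PySem.Str.isIn "Furniture-Room Relations:" l then cur else cur ++ [l] := by
  rw [pvClean_append]
  simp only [pvClean]
  cases hm : PySem.Str.isIn "Furniture-Room Relations:" l with
  | true =>
    cases h : pvHasM cur with
    | true => simp
    | false => simp
  | false =>
    cases h : pvHasM cur with
    | true => simp
    | false => simp

-- the invariant tying A's fold state to B's stage-1 fold state:
-- remove = "the open block contains a marker", new_lines = cleaned closed blocks ++ cleaned open block
theorem fold_invariant (ls : List String) : ∀ (blocks : List (List String)) (cur : List String),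
    ls.foldl pvStepA (pvHasM cur, blocks.flatMap pvClean ++ pvClean cur)
    = (pvHasM (ls.foldl pvBlocksStep (blocks, cur)).2,
       (ls.foldl pvBlocksStep (blocks, cur)).1.flatMap pvClean
         ++ pvClean (ls.foldl pvBlocksStep (blocks, cur)).2) := by
  induction ls with
  | nil => intro blocks cur; rfl
  | cons l rest ih =>
    intro blocks cur
    rw [List.foldl_cons, List.foldl_cons]
    by_cases hb : (PySem.Str.strip l == "") = true
    · -- blank line: closes the block; the marker test on l is false
      have hm : PySem.Str.isIn "Furniture-Room Relations:" l = false := by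
        cases h : PySem.Str.isIn "Furniture-Room Relations:" l with
        | false => rfl
        | true => rw [marker_not_blank l h] at hb; exact absurd hb (by simp)
      have hstep : pvStepA (pvHasM cur, blocks.flatMap pvClean ++ pvClean cur) l
          = (false, (blocks ++ [cur ++ [l]]).flatMap pvClean ++ pvClean ([] : List String)) := by
        simp only [pvStepA, List.flatMap_append, List.flatMap_cons, List.flatMap_nil,
          List.append_nil, pvClean_snoc]
        rw [hm, hb]
        cases h : pvHasM cur with
        | true => simp [pvClean]
        | false => simp [pvClean, pvClean_no_marker cur h, List.append_assoc]
      have hstepB : pvBlocksStep (blocks, cur) l = (blocks ++ [cur ++ [l]], []) := by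
        simp only [pvBlocksStep, hb, if_pos]
      rw [hstep, hstepB, ← ih]
      rfl
    · -- non-blank line: extends the open block
      have hb' : (PySem.Str.strip l == "") = false := by
        cases h : (PySem.Str.strip l == "") with
        | false => rfl
        | true => exact absurd h hb
      have hstep : pvStepA (pvHasM cur, blocks.flatMap pvClean ++ pvClean cur) l
          = (pvHasM (cur ++ [l]), blocks.flatMap pvClean ++ pvClean (cur ++ [l])) := by
        have hM : pvHasM (cur ++ [l])
            = (pvHasM cur || PySem.Str.isIn "Furniture-Room Relations:" l) := by
          simp only [pvHasM, List.any_append, List.any_cons, List.any_nil, Bool.or_false]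
        simp only [pvStepA, pvClean_snoc, hM]
        rw [hb']
        cases h : pvHasM cur with
        | true => simp
        | false =>
          cases hml : PySem.Str.isIn "Furniture-Room Relations:" l with
          | true => simp [pvClean_no_marker cur h]
          | false => simp [pvClean_no_marker cur h, List.append_assoc]
      have hstepB : pvBlocksStep (blocks, cur) l = (blocks, cur ++ [l]) := by
        simp only [pvBlocksStep, hb', Bool.false_eq_true, if_false]
      rw [hstep, hstepB, ih]

-- ===== VERDICT (by name: the statement is the Claim_ definition above) =====
theorem trim_template_to_fit_spec : Claim_equal_trim_template_to_fit := by
  intro s m _ _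
  unfold Spec_trim_template_to_fit trim_template_to_fit trim_template_to_fit_alt
  by_cases hlen : PySem.Str.len s ≤ m
  · simp only [if_pos hlen]
  · simp only [if_neg hlen]
    have h := fold_invariant ((PySem.Str.split? s "\n").getD []) [] []
    simp only [pvHasM, List.any_nil, List.flatMap_nil, pvClean, List.nil_append] at h
    rw [h]
    set st := ((PySem.Str.split? s "\n").getD []).foldl pvBlocksStep ([], []) with hst
    cases hcur : st.2 with
    | nil => simp [pvClean]
    | cons a as => simp [List.flatMap_append, pvClean]
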